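-- pv_equiv track=rewrite | github.com/rhender007/codesignal_problems | Lineup/lineup.py | solution
-- ===== SOURCE A (Python) =====
-- def solution(commands):
--
--     size = len(commands)
--     deg = 0
--     ret = 0
--     for i in range(0,size):
--         if commands[i] == 'L':
--             deg += -90
--         elif commands[i] == 'R':
--             deg += 90
--         elif commands[i] == 'A':
--             deg += 180
--         if deg%180==0:
--             ret += 1
--             deg = 0
--     return ret
-- ===== SOURCE B (Python) =====
-- def solution(commands):
--     n = len(commands)
--     # positions of the quarter-turn commands; parity of how many precede an
--     # index decides whether that soldier still faces the original axis
--     ps = [i for i, c in enumerate(commands) if c == 'L' or c == 'R']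
--     ps.append(n)
--     # soldiers in [0, ps[0]) have seen an even number of turns, then the
--     # segments alternate; add up the even-parity segment lengths in one go
--     ret = ps[0]
--     for j in range(1, len(ps) - 1, 2):
--         ret += ps[j + 1] - ps[j]
--     return ret
-- ===== Notes on version B (the rewrite author's own statement) =====
-- stated objective: alternative
-- what changed: Instead of simulating the march with a running degree accumulator that is tested and reset each step, B first extracts the list of positions of the quarter-turn ('L'/'R') commands and then computes the answer arithmetically as the total length of the alternating even-parity segments (ps[0] plus the gaps ps[j+1]-ps[j] for odd j).
import Mathlib
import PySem

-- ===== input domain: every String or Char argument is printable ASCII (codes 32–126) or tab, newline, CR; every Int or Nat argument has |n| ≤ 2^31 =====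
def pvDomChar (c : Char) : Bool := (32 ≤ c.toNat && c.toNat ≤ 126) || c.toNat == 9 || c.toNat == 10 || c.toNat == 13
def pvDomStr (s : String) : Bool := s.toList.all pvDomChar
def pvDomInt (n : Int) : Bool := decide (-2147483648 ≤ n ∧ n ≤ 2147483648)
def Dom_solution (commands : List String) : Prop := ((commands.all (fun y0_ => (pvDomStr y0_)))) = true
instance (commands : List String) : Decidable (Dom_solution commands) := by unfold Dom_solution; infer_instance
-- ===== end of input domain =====

-- B drops A's per-soldier degree accumulator entirely: it collects the positions of the
-- quarter-turn commands and sums the alternating even-parity segment lengths (objective: alternative).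

-- ===== PORT A =====
-- one loop iteration of A: update deg by the branch chain, then reset and count if deg%180==0
def stepA (s : Int × Int) (c : String) : Int × Int :=
  let deg := if c = "L" then s.1 + (-90)
             else if c = "R" then s.1 + 90
             else if c = "A" then s.1 + 180
             else s.1
  if PySem.Int.mod deg 180 = 0 then (0, s.2 + 1) else (deg, s.2)

def solution (commands : List String) : Int :=
  ((PySem.List.pyRange 0 (commands.length : Int) 1).foldl
      (fun s i => stepA s (PySem.List.pyGetD commands i "")) (0, 0)).2

-- ===== PORT B =====
-- ps = positions of 'L'/'R' commands (appended with n); answer = ps[0] plus the sum of the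
-- gaps ps[j+1]-ps[j] for odd j: the even-parity segments of the lineup
def solution_alt (commands : List String) : Int :=
  let n : Int := (commands.length : Int)
  let ps : List Int :=
    (((PySem.List.enumerate commands 0).filter
        (fun p => p.2 == "L" || p.2 == "R")).map (fun p => p.1)) ++ [n]
  let ret : Int := PySem.List.pyGetD ps 0 0
  (PySem.List.pyRange 1 ((ps.length : Int) - 1) 2).foldl
    (fun r j => r + PySem.List.pyGetD ps (j + 1) 0 - PySem.List.pyGetD ps j 0) ret

-- ===== PRECONDITION & SPEC =====
def Spec_solution (commands : List String) (out : Int) : Prop := out = solution_alt commands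
instance (commands : List String) (out : Int) : Decidable (Spec_solution commands out) := by unfold Spec_solution; infer_instance

-- ===== CLAIM (what is proved, stated in full; the proofs are below) =====
def Claim_equal_solution : Prop := ∀ (commands : List String), Dom_solution commands → Spec_solution commands (solution commands)

-- ===== LEMMAS AND PROOFS =====

-- reference count: number of prefixes (indices) whose L/R-parity is even
def cntF : List String → Bool → Int
  | [], _ => 0
  | c :: cs, p =>
    let p' := if c = "L" ∨ c = "R" then !p else p
    (if p' then 0 else 1) + cntF cs p'

-- positions (from offset i) of the quarter-turn commands
def turnsPos : List String → Int → List Int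
  | [], _ => []
  | c :: cs, i => if c = "L" ∨ c = "R" then i :: turnsPos cs (i + 1) else turnsPos cs (i + 1)

-- count of even-parity indices in [cur, bound) given the remaining turn positions qs and current parity p
def cnt2 : List Int → Int → Int → Bool → Int
  | [], cur, bound, p => if p then 0 else bound - cur
  | q :: rest, cur, bound, p => (if p then 0 else q - cur) + cnt2 rest q bound (!p)

-- sum of b - a over consecutive pairs
def pairSum : List Int → Int
  | a :: b :: rest => (b - a) + pairSum rest
  | _ => 0

theorem mod180_eq (x : Int) : PySem.Int.mod x 180 = x % 180 :=
  PySem.Int.mod_eq_emod_of_pos (by norm_num)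

-- A's loop with the degree/reset state computes cntF
theorem keyA (cs : List String) : ∀ (deg ret : Int) (p : Bool),
    ((p = false ∧ deg = 0) ∨ (p = true ∧ deg % 180 = 90)) →
    (cs.foldl stepA (deg, ret)).2 = ret + cntF cs p := by
  induction cs with
  | nil => intro deg ret p _; simp [cntF]
  | cons c cs ih =>
    intro deg ret p hinv
    simp only [List.foldl_cons, stepA, cntF]
    by_cases hL : c = "L"
    · rw [if_pos hL, if_pos (Or.inl hL), mod180_eq]
      rcases hinv with ⟨hp, h0⟩ | ⟨hp, h90⟩
      · subst hp
        rw [if_neg (by omega), ih _ _ true (Or.inr ⟨rfl, by omega⟩)]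
        split_ifs <;> simp_all <;> omega
      · subst hp
        rw [if_pos (by omega), ih _ _ false (Or.inl ⟨rfl, rfl⟩)]
        split_ifs <;> simp_all <;> omega
    · by_cases hR : c = "R"
      · rw [if_neg hL, if_pos hR, if_pos (Or.inr hR), mod180_eq]
        rcases hinv with ⟨hp, h0⟩ | ⟨hp, h90⟩
        · subst hp
          rw [if_neg (by omega), ih _ _ true (Or.inr ⟨rfl, by omega⟩)]
          split_ifs <;> simp_all <;> omega
        · subst hp
          rw [if_pos (by omega), ih _ _ false (Or.inl ⟨rfl, rfl⟩)]
          split_ifs <;> simp_all <;> omega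
      · have hLR : ¬ (c = "L" ∨ c = "R") := by tauto
        rw [if_neg hL, if_neg hR, if_neg hLR]
        by_cases hA : c = "A"
        · rw [if_pos hA, mod180_eq]
          rcases hinv with ⟨hp, h0⟩ | ⟨hp, h90⟩
          · subst hp
            rw [if_pos (by omega), ih _ _ false (Or.inl ⟨rfl, rfl⟩)]
            split_ifs <;> simp_all <;> omega
          · subst hp
            rw [if_neg (by omega), ih _ _ true (Or.inr ⟨rfl, by omega⟩)]
            split_ifs <;> simp_all <;> omega
        · rw [if_neg hA, mod180_eq]
          rcases hinv with ⟨hp, h0⟩ | ⟨hp, h90⟩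
          · subst hp
            rw [if_pos (by omega), ih _ _ false (Or.inl ⟨rfl, rfl⟩)]
            split_ifs <;> simp_all <;> omega
          · subst hp
            rw [if_neg (by omega), ih _ _ true (Or.inr ⟨rfl, h90⟩)]
            split_ifs <;> simp_all <;> omega

-- the enumerate/filter/map pipeline of B computes turnsPos
theorem enum_turnsPos (cs : List String) : ∀ (i : Int),
    (((PySem.List.enumerate cs i).filter
        (fun p => p.2 == "L" || p.2 == "R")).map (fun p => p.1)) = turnsPos cs i := by
  induction cs with
  | nil => intro i; simp [PySem.List.enumerate_nil, turnsPos]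
  | cons c cs ih =>
    intro i
    rw [PySem.List.enumerate_cons]
    by_cases h : c = "L" ∨ c = "R"
    · have hb : ((i, c).2 == "L" || (i, c).2 == "R") = true := by
        rcases h with h | h <;> simp [h]
      simp [List.filter_cons, hb, ih, turnsPos, h]
    · have h1 : ¬ c = "L" := fun hh => h (Or.inl hh)
      have h2 : ¬ c = "R" := fun hh => h (Or.inr hh)
      have hb : ((i, c).2 == "L" || (i, c).2 == "R") = false := by simp [h1, h2]
      simp [List.filter_cons, hb, ih, turnsPos, h]

-- every turn position from offset i is ≥ i
theorem turnsPos_ge (cs : List String) : ∀ (i q : Int), q ∈ turnsPos cs i → i ≤ q := by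
  induction cs with
  | nil => intro i q h; simp [turnsPos] at h
  | cons c cs ih =>
    intro i q h
    simp only [turnsPos] at h
    split_ifs at h with hc
    · rcases List.mem_cons.mp h with h | h
      · omega
      · have := ih (i + 1) q h; omega
    · have := ih (i + 1) q h; omega

-- advancing cur by one through an even/odd region
theorem cnt2_shift (qs : List Int) (cur bound : Int) (p : Bool)
    (h : cur < qs.headD bound) :
    cnt2 qs cur bound p = (if p then 0 else 1) + cnt2 qs (cur + 1) bound p := by
  cases qs with
  | nil =>
    simp only [List.headD_nil] at h
    simp only [cnt2]; split_ifs <;> omega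
  | cons q rest =>
    simp only [List.headD_cons] at h
    simp only [cnt2]
    generalize cnt2 rest q bound (!p) = X
    split_ifs <;> omega

-- cntF equals the segment count cnt2 over the turn positions
theorem cnt_eq (cs : List String) : ∀ (i : Int) (p : Bool),
    cntF cs p = cnt2 (turnsPos cs i) i (i + (cs.length : Int)) p := by
  induction cs with
  | nil => intro i p; simp [cntF, turnsPos, cnt2]
  | cons c cs ih =>
    intro i p
    simp only [cntF, turnsPos, List.length_cons]
    have hb : i + ((cs.length : Nat) + 1 : Nat) = (i + 1) + (cs.length : Int) := by
      push_cast; ring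
    by_cases hc : c = "L" ∨ c = "R"
    · rw [if_pos hc, if_pos hc]
      simp only [cnt2, sub_self, if_pos rfl]
      have hshift : cnt2 (turnsPos cs (i + 1)) i (i + 1 + (cs.length : Int)) (!p)
          = (if (!p) then 0 else 1) + cnt2 (turnsPos cs (i + 1)) (i + 1) (i + 1 + (cs.length : Int)) (!p) := by
        apply cnt2_shift
        cases hq : turnsPos cs (i + 1) with
        | nil => simp; omega
        | cons q rest =>
          have : q ∈ turnsPos cs (i + 1) := by rw [hq]; exact List.mem_cons_self
          have := turnsPos_ge cs (i + 1) q this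
          simp; omega
      rw [hb, hshift, ← ih (i + 1) (!p)]
      split_ifs <;> ring
    · rw [if_neg hc, if_neg hc]
      have hshift : cnt2 (turnsPos cs (i + 1)) i (i + 1 + (cs.length : Int)) p
          = (if p then 0 else 1) + cnt2 (turnsPos cs (i + 1)) (i + 1) (i + 1 + (cs.length : Int)) p := by
        apply cnt2_shift
        cases hq : turnsPos cs (i + 1) with
        | nil => simp; omega
        | cons q rest =>
          have : q ∈ turnsPos cs (i + 1) := by rw [hq]; exact List.mem_cons_self
          have := turnsPos_ge cs (i + 1) q this
          simp; omega
      rw [hb, hshift, ← ih (i + 1) p]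

-- cnt2 in terms of pairSum
theorem cnt2_pairSum (qs : List Int) : ∀ (cur bound : Int),
    cnt2 qs cur bound true = pairSum (qs ++ [bound]) ∧
    cnt2 qs cur bound false = (qs ++ [bound]).headD 0 - cur + pairSum ((qs ++ [bound]).tail) := by
  induction qs with
  | nil =>
    intro cur bound
    simp [cnt2, pairSum]
  | cons q rest ih =>
    intro cur bound
    constructor
    · simp only [cnt2, if_pos rfl, Bool.not_true, List.cons_append]
      rw [(ih q bound).2]
      cases rest with
      | nil => simp [pairSum]
      | cons r rest2 => simp [pairSum]
    · simp only [cnt2, if_neg (by simp : ¬ false = true), Bool.not_false, List.cons_append,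
        List.headD_cons, List.tail_cons]
      rw [(ih q bound).1]

theorem pairSum_short (t : List Int) (h : t.length ≤ 1) : pairSum t = 0 := by
  cases t with
  | nil => rfl
  | cons a t2 => cases t2 with
    | nil => rfl
    | cons b t3 => simp at h

theorem pyRange_two_nil (a b : Int) (h : ¬ a < b) : PySem.List.pyRange a b 2 = [] := by
  rw [PySem.List.pyRange_of_pos a b (by norm_num)]
  simp [h]

theorem pyRange_two_cons (a b : Int) (h : a < b) : PySem.List.pyRange a b 2 = a :: PySem.List.pyRange (a + 2) b 2 := by
  rw [PySem.List.pyRange_of_pos a b (by norm_num),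
      PySem.List.pyRange_of_pos (a + 2) b (by norm_num)]
  by_cases h2 : a + 2 < b
  · have hcnt : ((b - a + 2 - 1) / 2).toNat = ((b - (a + 2) + 2 - 1) / 2).toNat + 1 := by
      omega
    rw [if_pos h, if_pos h2, hcnt, List.range_succ_eq_map]
    simp only [List.map_cons, List.map_map]
    congr 1
    · norm_num
    · apply List.map_congr_left
      intro k _
      simp only [Function.comp_apply]
      push_cast; ring
  · have hcnt : ((b - a + 2 - 1) / 2).toNat = 1 := by
      have h1 : (1:Int) ≤ b - a := by omega
      have h2' : b - a ≤ 2 := by omega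
      interval_cases h3 : (b - a) <;> norm_num
    rw [if_pos h, if_neg h2, hcnt]
    simp

-- the step-2 index fold over qs computes pairSum of the dropped tail
theorem fold_pairs (qs : List Int) : ∀ (m k : Nat) (init : Int), m = qs.length - k → 1 ≤ k →
    (PySem.List.pyRange (k : Int) ((qs.length : Int) - 1) 2).foldl
      (fun r j => r + PySem.List.pyGetD qs (j + 1) 0 - PySem.List.pyGetD qs j 0) init
    = init + pairSum (qs.drop k) := by
  intro m
  induction m using Nat.strong_induction_on with
  | _ m IH =>
    intro k init hm hk
    by_cases h : (k : Int) < (qs.length : Int) - 1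
    · have hk1 : k + 1 < qs.length := by omega
      have hk0 : k < qs.length := by omega
      rw [pyRange_two_cons _ _ h]
      simp only [List.foldl_cons]
      have e1 : ((k : Int) + 1) = ((k + 1 : Nat) : Int) := by push_cast; ring
      have e2 : ((k : Int) + 2) = ((k + 2 : Nat) : Int) := by push_cast; ring
      rw [e1, e2, PySem.List.pyGetD_natCast, PySem.List.pyGetD_natCast,
        IH (qs.length - (k + 2)) (by omega) (k + 2) _ rfl (by omega)]
      have hdk : qs.drop k = qs[k] :: qs[k + 1] :: qs.drop (k + 2) := by
        rw [List.drop_eq_getElem_cons hk0, List.drop_eq_getElem_cons hk1]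
      rw [hdk]
      simp only [pairSum, List.getD_eq_getElem _ _ hk0, List.getD_eq_getElem _ _ hk1]
      ring
    · rw [pyRange_two_nil _ _ h]
      have : pairSum (qs.drop k) = 0 := by
        apply pairSum_short
        simp only [List.length_drop]
        omega
      simp [this]

-- ===== VERDICT (by name: the statement is the Claim_ definition above) =====
theorem solution_spec : Claim_equal_solution := by
  intro commands _
  unfold Spec_solution solution solution_alt
  rw [PySem.List.foldl_pyRange_zero_pyGetD' commands "" stepA (0, 0)]
  rw [keyA commands 0 0 false (Or.inl ⟨rfl, rfl⟩)]
  simp only [enum_turnsPos commands 0]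
  have hfp := fold_pairs (turnsPos commands 0 ++ [(commands.length : Int)])
    ((turnsPos commands 0 ++ [(commands.length : Int)]).length - 1) 1
    (PySem.List.pyGetD (turnsPos commands 0 ++ [(commands.length : Int)]) 0 0) rfl le_rfl
  rw [Nat.cast_one] at hfp
  rw [hfp]
  rw [cnt_eq commands 0 false]
  simp only [zero_add]
  rw [(cnt2_pairSum (turnsPos commands 0) 0 ((commands.length : Int))).2]
  have h0 : PySem.List.pyGetD (turnsPos commands 0 ++ [(commands.length : Int)]) ((0:Nat) : Int) 0
      = (turnsPos commands 0 ++ [(commands.length : Int)]).getD 0 0 :=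
    PySem.List.pyGetD_natCast _ 0 0
  rw [show ((0:Int)) = ((0:Nat) : Int) from rfl] at *
  rw [h0]
  cases hq : turnsPos commands 0 ++ [(commands.length : Int)] with
  | nil => simp at hq
  | cons a rest =>
    simp only [List.getD_cons_zero, List.headD_cons, List.tail_cons, List.drop_one,
      List.tail_cons, zero_add, sub_zero]
    ring
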